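-- pv_equiv track=rewrite | github.com/ljz3/CSCA08-A3 | a3/club_functions.py | convert_dict_to_tup_list
-- ===== SOURCE A (Python) =====
-- from typing import List, Tuple, Dict, TextIO
--
-- def invert_and_sort(key_to_value: Dict[object, object]) -> Dict[object, list]:
--     """Return key_to_value inverted so that each key is a value (for
--     non-list values) or an item from an iterable value, and each value
--     is a list of the corresponding keys from key_to_value.  The value
--     lists in the returned dict are sorted.
--
--     >>> invert_and_sort(P2C) == {
--     ...  'Comet Club': ['Michelle Tanner'],
--     ...  'Parent Council': ['Danny R Tanner', 'Jesse Katsopolis',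
--     ...                     'Joey Gladstone'],
--     ...  'Rock N Rollers': ['Jesse Katsopolis', 'Kimmy Gibbler'],
--     ...  'Comics R Us': ['Joey Gladstone'],
--     ...  'Smash Club': ['Kimmy Gibbler']}
--     True
--
--     """
--     inverted = {}
--     for key in key_to_value:
--         if type(key_to_value[key]) is list:
--             for value in key_to_value[key]:
--                 if value not in inverted:
--                     inverted[value] = []
--                 inverted[value].append(key)
--             for inv_key in inverted:
--                 inverted[inv_key].sort()
--         else:
--             if key_to_value[key] not in inverted:
--                 inverted[key_to_value[key]] = []
--             inverted[key_to_value[key]].append(key)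
--
--     return inverted
--
-- def convert_dict_to_tup_list(
--         clubs: Dict[str, List[int]]) -> List[Tuple[str, int]]:
--     """
--     Returns a list of tuples using the contents from clubs.
--
--     >>> convert_dict_to_tup_list({'Comics R Us': [2], 'Smash Club': [1]})
--     [('Comics R Us', 2), ('Smash Club', 1)]
--     """
--     list_of_tuple = []
--     list_of_nums = []
--     inverted = invert_and_sort(clubs)
--
--     for key in inverted:
--         list_of_nums.append((key))
--
--     for num in list_of_nums:
--         for key in inverted:
--             if key == num:
--                 for club in inverted[key]:
--                     list_of_tuple.append((club, key))
--
--     return list_of_tuple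
-- ===== SOURCE B (Python) =====
-- def convert_dict_to_tup_list(
--         clubs: "Dict[str, List[int]]") -> "List[Tuple[str, int]]":
--     """Faster single-pass inversion: group clubs by number once, sort each
--     group once at the end, then flatten in first-appearance order."""
--     inverted = {}
--     for club, nums in clubs.items():
--         for num in nums:
--             inverted.setdefault(num, []).append(club)
--     result = []
--     for num, members in inverted.items():
--         for club in sorted(members):
--             result.append((club, num))
--     return result
-- ===== Notes on version B (the rewrite author's own statement) =====
-- stated objective: faster
-- what changed: B builds the inverted dict in one pass with setdefault/append and sorts each member list once at the end, then flattens by a single walk over the dict items, replacing A's re-sort of every value list after every input key and its quadratic key-by-key matching flatten.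
import Mathlib
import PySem

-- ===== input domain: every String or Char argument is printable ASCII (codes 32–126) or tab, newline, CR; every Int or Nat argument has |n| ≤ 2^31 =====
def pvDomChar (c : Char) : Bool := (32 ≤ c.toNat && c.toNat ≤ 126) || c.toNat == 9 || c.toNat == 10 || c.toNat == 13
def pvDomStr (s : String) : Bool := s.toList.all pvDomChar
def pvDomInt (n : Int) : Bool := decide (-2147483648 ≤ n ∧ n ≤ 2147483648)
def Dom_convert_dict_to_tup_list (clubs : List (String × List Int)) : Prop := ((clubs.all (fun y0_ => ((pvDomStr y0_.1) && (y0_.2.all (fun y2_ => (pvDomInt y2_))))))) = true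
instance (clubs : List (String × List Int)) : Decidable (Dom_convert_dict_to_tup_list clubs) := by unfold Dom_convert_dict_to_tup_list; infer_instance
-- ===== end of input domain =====

-- B inverts the dict in one pass (setdefault/append) and sorts each member list once at
-- the end, instead of A's re-sort of every value list after every key and its quadratic
-- key-matching flatten; same return value, neither side mutates its argument.
-- Both ports read the association list into a PySem.Dict first (duplicate keys overwrite
-- in place), modelling the Python dict argument.

-- ===== PORT A =====
-- Python helper invert_and_sort, specialized to the dict[str, list[int]] instantiation
-- used here: every value is a list, so the Python `else` (non-list) branch is dead code.
def invert_and_sort (key_to_value : PySem.Dict String (List Int)) : PySem.Dict Int (List String) :=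
  key_to_value.items.foldl
    (fun inverted kv =>
      -- for value in key_to_value[key]: ensure key present, then append
      let inv1 := kv.2.foldl
        (fun inv value =>
          let inv := if inv.contains value then inv else inv.insert value []
          inv.modify value [] (fun l => l ++ [kv.1])) inverted
      -- for inv_key in inverted: inverted[inv_key].sort()
      inv1.keys.foldl
        (fun inv inv_key => inv.modify inv_key [] (fun l => PySem.List.sorted l (fun x => x) false))
        inv1)
    PySem.Dict.empty

def convert_dict_to_tup_list (clubs : List (String × List Int)) : List (String × Int) :=
  let inverted := invert_and_sort (PySem.Dict.ofList clubs)
  let list_of_nums := inverted.keys.foldl (fun l k => l ++ [k]) []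
  list_of_nums.foldl
    (fun acc num =>
      inverted.keys.foldl
        (fun acc key =>
          if key == num then
            (inverted.getD key []).foldl (fun acc club => acc ++ [(club, key)]) acc
          else acc)
        acc)
    []

-- ===== PORT B =====
def convert_dict_to_tup_list_alt (clubs : List (String × List Int)) : List (String × Int) :=
  let inverted := (PySem.Dict.ofList clubs).items.foldl
    (fun inv kv => kv.2.foldl (fun inv num => inv.modify num [] (fun l => l ++ [kv.1])) inv)
    PySem.Dict.empty
  inverted.items.foldl
    (fun res kv =>
      (PySem.List.sorted kv.2 (fun x => x) false).foldl (fun res club => res ++ [(club, kv.1)]) res)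
    []

-- ===== PRECONDITION & SPEC =====
def Spec_convert_dict_to_tup_list (clubs : List (String × List Int)) (out : List (String × Int)) : Prop := out = convert_dict_to_tup_list_alt clubs
instance (clubs : List (String × List Int)) (out : List (String × Int)) : Decidable (Spec_convert_dict_to_tup_list clubs out) := by unfold Spec_convert_dict_to_tup_list; infer_instance

-- ===== CLAIM (what is proved, stated in full; the proofs are below) =====
def Claim_equal_convert_dict_to_tup_list : Prop := ∀ (clubs : List (String × List Int)), Dom_convert_dict_to_tup_list clubs → Spec_convert_dict_to_tup_list clubs (convert_dict_to_tup_list clubs)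

-- ===== LEMMAS AND PROOFS =====

-- sorting a list of strings depends only on its multiset of elements
theorem pv_sorted_sorted_append (xs K : List String) :
    PySem.List.sorted (PySem.List.sorted xs (fun x => x) false ++ K) (fun x => x) false
      = PySem.List.sorted (xs ++ K) (fun x => x) false :=
  PySem.List.sorted_id_eq_of_perm_of_pairwise _ _
    ((PySem.List.sorted_perm (xs ++ K) _ false).trans
      (((PySem.List.sorted_perm xs (fun x => x) false).append_right K).symm))
    (PySem.List.sorted_pairwise (xs ++ K) (fun x => x))

theorem pv_sorted_nil :
    PySem.List.sorted ([] : List String) (fun x => x) false = [] :=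
  List.perm_nil.mp (PySem.List.sorted_perm [] (fun x => x) false)

-- A's "ensure key exists, then append" is exactly a modify
theorem pv_ensure_modify (d : PySem.Dict Int (List String)) (v : Int) (f : List String → List String) :
    (if d.contains v then d else d.insert v []).modify v [] f = d.modify v [] f := by
  by_cases h : d.contains v = true
  · simp [h]
  · simp only [Bool.not_eq_true] at h
    simp only [h, Bool.false_eq_true, if_false, PySem.Dict.modify,
      PySem.Dict.getD_insert_self, PySem.Dict.insert_insert_self,
      PySem.Dict.getD_of_not_contains d [] h]

theorem pv_inner_eq (ns : List Int) (c : String) (d : PySem.Dict Int (List String)) :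
    ns.foldl (fun inv value =>
        let inv := if inv.contains value then inv else inv.insert value []
        inv.modify value [] (fun l => l ++ [c])) d
      = ns.foldl (fun inv num => inv.modify num [] (fun l => l ++ [c])) d :=
  PySem.List.foldl_congr_mem ns _ _ d (fun acc x _ => pv_ensure_modify acc x _)

-- value of the append loop at each key
theorem pv_mid_getD (ns : List Int) (c : String) (d : PySem.Dict Int (List String)) (num : Int) :
    (ns.foldl (fun inv n => inv.modify n [] (fun l => l ++ [c])) d).getD num []
      = d.getD num [] ++ (ns.filter (fun n => n == num)).map (fun _ => c) := by
  induction ns generalizing d with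
  | nil => simp
  | cons a t ih =>
    simp only [List.foldl_cons, List.filter_cons, ih]
    by_cases h : a = num
    · subst h; simp
    · simp [PySem.Dict.getD_modify, h, Ne.symm h]

theorem pv_set_update_of_subset (s : PySem.Set Int) (l : List Int) (h : ∀ x ∈ l, x ∈ s) :
    PySem.Set.update s l = s := by
  induction l generalizing s with
  | nil => rfl
  | cons a t ih =>
    simp only [PySem.Set.update, List.foldl_cons]
    rw [PySem.Set.add_of_mem (h a (List.mem_cons_self))]
    exact ih s (fun x hx => h x (List.mem_cons_of_mem a hx))

-- fold of modifies over a Nodup key list: each key modified exactly once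
theorem pv_foldl_modify_getD (g : List String → List String)
    (ks : List Int) (d : PySem.Dict Int (List String)) (hk : ks.Nodup) (num : Int) :
    (ks.foldl (fun inv k => inv.modify k [] g) d).getD num []
      = if num ∈ ks then g (d.getD num []) else d.getD num [] := by
  induction ks generalizing d with
  | nil => simp
  | cons a t ih =>
    simp only [List.foldl_cons]
    rcases List.nodup_cons.mp hk with ⟨ha, ht⟩
    rw [ih _ ht]
    by_cases h1 : num ∈ t
    · have hne : num ≠ a := fun h => ha (h ▸ h1)
      simp [h1, hne, PySem.Dict.getD_modify]
    · by_cases h2 : num = a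
      · subst h2; simp [h1]
      · simp [h1, h2, PySem.Dict.getD_modify]

-- the sort-everything pass: keys unchanged, every value sorted
theorem pv_sortAll_getD (x : PySem.Dict Int (List String)) (hx : x.keys.Nodup) (num : Int) :
    (x.keys.foldl (fun inv inv_key =>
        inv.modify inv_key [] (fun l => PySem.List.sorted l (fun x => x) false)) x).getD num []
      = PySem.List.sorted (x.getD num []) (fun x => x) false := by
  rw [pv_foldl_modify_getD _ x.keys x hx num]
  by_cases h : num ∈ x.keys
  · simp [h]
  · have hc : x.contains num = false := by
      cases hc : x.contains num with
      | false => rfl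
      | true => exact absurd ((PySem.Dict.contains_iff_mem_keys x num).mp hc) h
    simp [h, PySem.Dict.getD_of_not_contains x [] hc, pv_sorted_nil]

theorem pv_sortAll_keys (x : PySem.Dict Int (List String)) :
    (x.keys.foldl (fun inv inv_key =>
        inv.modify inv_key [] (fun l => PySem.List.sorted l (fun x => x) false)) x).keys
      = x.keys := by
  have h := PySem.Dict.keys_foldl_modify_key x.keys (fun k => k) []
    (fun _ _ => (fun l => PySem.List.sorted l (fun x => x) false)) x
  simp only [List.map_id'] at h
  exact h.trans (pv_set_update_of_subset x.keys x.keys (fun _ hx => hx))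

-- the per-item relation maintained between A's dict and B's dict
def pvRel (dA dB : PySem.Dict Int (List String)) : Prop :=
  dA.keys = dB.keys ∧ dA.keys.Nodup ∧
    ∀ num, dA.getD num [] = PySem.List.sorted (dB.getD num []) (fun x => x) false

theorem pv_invariant (items : List (String × List Int)) (dA dB : PySem.Dict Int (List String))
    (h : pvRel dA dB) :
    pvRel
      (items.foldl
        (fun inverted kv =>
          let inv1 := kv.2.foldl
            (fun inv value =>
              let inv := if inv.contains value then inv else inv.insert value []
              inv.modify value [] (fun l => l ++ [kv.1])) inverted
          inv1.keys.foldl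
            (fun inv inv_key => inv.modify inv_key [] (fun l => PySem.List.sorted l (fun x => x) false))
            inv1) dA)
      (items.foldl
        (fun inv kv => kv.2.foldl (fun inv num => inv.modify num [] (fun l => l ++ [kv.1])) inv)
        dB) := by
  induction items generalizing dA dB with
  | nil => exact h
  | cons kv rest ih =>
    simp only [List.foldl_cons]
    apply ih
    rcases h with ⟨hkeys, hnd, hget⟩
    rw [pv_inner_eq kv.2 kv.1 dA]
    -- key facts about the append loop
    have hmidkeysA : (kv.2.foldl (fun inv num => inv.modify num [] (fun l => l ++ [kv.1])) dA).keys
        = PySem.Set.update dA.keys kv.2 := by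
      have h := PySem.Dict.keys_foldl_modify_key kv.2 (fun k => k) []
        (fun _ _ => (fun l => l ++ [kv.1])) dA
      simpa using h
    have hmidkeysB : (kv.2.foldl (fun inv num => inv.modify num [] (fun l => l ++ [kv.1])) dB).keys
        = PySem.Set.update dB.keys kv.2 := by
      have h := PySem.Dict.keys_foldl_modify_key kv.2 (fun k => k) []
        (fun _ _ => (fun l => l ++ [kv.1])) dB
      simpa using h
    have hmidnd : (kv.2.foldl (fun inv num => inv.modify num [] (fun l => l ++ [kv.1])) dA).keys.Nodup :=
      PySem.Dict.nodup_keys_foldl_modify_key kv.2 (fun k => k) []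
        (fun _ _ => (fun l => l ++ [kv.1])) dA hnd
    refine ⟨?_, ?_, ?_⟩
    · rw [pv_sortAll_keys, hmidkeysA, hmidkeysB, hkeys]
    · rw [pv_sortAll_keys]; exact hmidnd
    · intro num
      rw [pv_sortAll_getD _ hmidnd num, pv_mid_getD, pv_mid_getD, hget num,
        pv_sorted_sorted_append]

-- if-guarded append over a Nodup list picks out exactly one key
theorem pv_foldl_if_append (g : Int → List (String × Int)) (ks : List Int) (num : Int)
    (acc : List (String × Int)) :
    ks.foldl (fun acc key => if key == num then acc ++ g key else acc) acc
      = acc ++ (ks.filter (fun key => key == num)).flatMap g := by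
  induction ks generalizing acc with
  | nil => simp
  | cons a t ih =>
    simp only [List.foldl_cons, List.filter_cons]
    by_cases h : (a == num) = true
    · rw [if_pos h, if_pos h, ih, List.flatMap_cons, ← List.append_assoc]
    · rw [if_neg h, if_neg h, ih]

theorem pv_filter_nodup (ks : List Int) (num : Int) (hk : ks.Nodup) :
    ks.filter (fun key => key == num) = if num ∈ ks then [num] else [] := by
  induction ks with
  | nil => simp
  | cons a t ih =>
    rcases List.nodup_cons.mp hk with ⟨ha, ht⟩
    by_cases h2 : a = num
    · subst h2
      have hnil : t.filter (fun key => key == a) = [] :=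
        List.filter_eq_nil_iff.mpr (fun x hx => by
          simp only [beq_iff_eq]
          exact fun he => ha (he ▸ hx))
      simp [hnil]
    · simp [h2, ih ht, Ne.symm h2]

-- ===== VERDICT (by name: the statement is the Claim_ definition above) =====
theorem convert_dict_to_tup_list_spec : Claim_equal_convert_dict_to_tup_list := by
  intro clubs _
  unfold Spec_convert_dict_to_tup_list convert_dict_to_tup_list convert_dict_to_tup_list_alt
    invert_and_sort
  dsimp only
  have hrel := pv_invariant (PySem.Dict.ofList clubs).items PySem.Dict.empty PySem.Dict.empty
    ⟨rfl, PySem.Dict.nodup_keys_empty, fun num => by simp [PySem.Dict.getD_empty, pv_sorted_nil]⟩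
  set dA := (PySem.Dict.ofList clubs).items.foldl
    (fun inverted kv =>
      let inv1 := kv.2.foldl
        (fun inv value =>
          let inv := if inv.contains value then inv else inv.insert value []
          inv.modify value [] (fun l => l ++ [kv.1])) inverted
      inv1.keys.foldl
        (fun inv inv_key => inv.modify inv_key [] (fun l => PySem.List.sorted l (fun x => x) false))
        inv1) PySem.Dict.empty with hdA
  set dB := (PySem.Dict.ofList clubs).items.foldl
    (fun inv kv => kv.2.foldl (fun inv num => inv.modify num [] (fun l => l ++ [kv.1])) inv)
    PySem.Dict.empty with hdB
  rcases hrel with ⟨hkeys, hnd, hget⟩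
  have hndB : dB.keys.Nodup := hkeys ▸ hnd
  rw [PySem.List.foldl_append_singleton dA.keys [], List.nil_append]
  have hA : dA.keys.foldl
      (fun acc num => dA.keys.foldl
        (fun acc key => if key == num then
            (dA.getD key []).foldl (fun acc club => acc ++ [(club, key)]) acc
          else acc) acc) []
      = dA.keys.flatMap (fun num => (dA.getD num []).map (fun club => (club, num))) := by
    rw [PySem.List.foldl_congr_mem dA.keys _
      (fun acc num => acc ++ (dA.getD num []).map (fun club => (club, num))) []
      (fun acc num hnum => by
        dsimp only
        rw [PySem.List.foldl_congr_mem dA.keys _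
          (fun acc key => if key == num then
              acc ++ (dA.getD key []).map (fun club => (club, key)) else acc) acc
          (fun acc key _ => by
            dsimp only
            by_cases h : (key == num) = true
            · rw [if_pos h, if_pos h, PySem.List.foldl_append_singleton_eq_map]
            · rw [if_neg h, if_neg h]),
          pv_foldl_if_append, pv_filter_nodup dA.keys num hnd]
        simp [hnum]),
      PySem.List.foldl_append_eq_flatMap, List.nil_append]
  rw [hA]
  have hB : dB.items.foldl
      (fun res kv => (PySem.List.sorted kv.2 (fun x => x) false).foldl
        (fun res club => res ++ [(club, kv.1)]) res) []
      = dB.keys.flatMap (fun num =>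
          (PySem.List.sorted (dB.getD num []) (fun x => x) false).map (fun club => (club, num))) := by
    rw [PySem.List.foldl_congr_mem dB.items _
      (fun res kv => res ++ (PySem.List.sorted kv.2 (fun x => x) false).map (fun club => (club, kv.1))) []
      (fun res kv _ => by dsimp only; rw [PySem.List.foldl_append_singleton_eq_map]),
      PySem.List.foldl_append_eq_flatMap, List.nil_append,
      PySem.Dict.items_eq_map_keys dB hndB [], List.flatMap_map]
  rw [hB, hkeys]
  exact List.flatMap_congr (fun num _ => by rw [hget num])
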